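-- pv_equiv track=rewrite | github.com/minarth/advent-of-code | 2025/03/main.py | part_one
-- ===== SOURCE A (Python) =====
-- def part_one(data):
--     # naive way
--     counter = 0
--     for number in data:
--         highest = 0
--         for i, n in enumerate(number):
--             for m in number[i+1:]:
--                 if n*10 + m > highest:
--                     highest = n*10 + m
--         counter += highest
--     return counter
-- ===== SOURCE B (Python) =====
-- def part_one(data):
--     # one right-to-left pass per row: track the max element seen so far (the best
--     # second digit for any earlier position) and the best pair value
--     total = 0
--     for number in data:
--         best = 0
--         suf = None
--         for x in reversed(number):
--             if suf is not None:
--                 cand = x * 10 + suf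
--                 if cand > best:
--                     best = cand
--             if suf is None or x > suf:
--                 suf = x
--         total += best
--     return total
-- ===== Notes on version B (the rewrite author's own statement) =====
-- stated objective: faster
-- what changed: replaces the nested pair scan per row (every element against every later element) by a single right-to-left pass per row that keeps the running maximum of the elements already seen, so each element is paired only with the best later element
import Mathlib
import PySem

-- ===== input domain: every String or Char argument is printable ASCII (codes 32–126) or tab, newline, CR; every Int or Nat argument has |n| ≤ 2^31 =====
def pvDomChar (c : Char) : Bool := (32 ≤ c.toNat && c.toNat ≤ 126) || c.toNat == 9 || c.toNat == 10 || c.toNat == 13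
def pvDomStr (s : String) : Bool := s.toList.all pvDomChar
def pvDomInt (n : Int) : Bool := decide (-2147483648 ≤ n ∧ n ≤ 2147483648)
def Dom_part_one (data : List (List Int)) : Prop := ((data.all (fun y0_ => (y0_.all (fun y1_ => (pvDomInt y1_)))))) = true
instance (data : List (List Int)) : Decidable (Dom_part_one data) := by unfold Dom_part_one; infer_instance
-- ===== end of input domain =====

-- B replaces A's nested per-row pair scan by one right-to-left pass keeping the running max element (asymptotically faster); same return value.

-- ===== PORT A =====
-- literal port: for each row, nested loops over enumerate(number) and the slice number[i+1:]
def part_one (data : List (List Int)) : Int :=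
  data.foldl
    (fun counter number =>
      let highest :=
        (PySem.List.enumerate number).foldl
          (fun highest p =>
            (PySem.List.slice number (some (p.1 + 1)) none).foldl
              (fun highest m =>
                if p.2 * 10 + m > highest then p.2 * 10 + m else highest)
              highest)
          0
      counter + highest)
    0

-- ===== PORT B =====
-- one step of B's reversed scan: state = (best pair value so far, max element seen so far)
def pvRowStep (st : Int × Option Int) (x : Int) : Int × Option Int :=
  match st with
  | (best, none) => (best, some x)
  | (best, some s) =>
      let cand := x * 10 + s
      let best := if cand > best then cand else best
      (best, some (if x > s then x else s))

def part_one_alt (data : List (List Int)) : Int :=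
  data.foldl
    (fun total number => total + (number.reverse.foldl pvRowStep (0, none)).1)
    0

-- ===== PRECONDITION & SPEC =====
def Spec_part_one (data : List (List Int)) (out : Int) : Prop := out = part_one_alt data
instance (data : List (List Int)) (out : Int) : Decidable (Spec_part_one data out) := by unfold Spec_part_one; infer_instance

-- ===== CLAIM (what is proved, stated in full; the proofs are below) =====
def Claim_equal_part_one : Prop := ∀ (data : List (List Int)), Dom_part_one data → Spec_part_one data (part_one data)

-- ===== LEMMAS AND PROOFS =====

-- B's reversed foldl, rewritten as a foldr over the row (via List.foldl_reverse)
def pvH (xs : List Int) : Int × Option Int :=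
  xs.foldr (fun x st => pvRowStep st x) (0, none)

-- A's row loop as plain structural recursion (enumerate/slice removed)
def pvGA (xs : List Int) (a : Int) : Int :=
  match xs with
  | [] => a
  | x :: t => pvGA t (t.foldl (fun h m => if x * 10 + m > h then x * 10 + m else h) a)

theorem pvH_cons (y : Int) (t : List Int) : pvH (y :: t) = pvRowStep (pvH t) y := rfl

theorem pvH_snd_none : ∀ (t : List Int), (pvH t).2 = none → t = [] := by
  intro t h
  cases t with
  | nil => rfl
  | cons y t' =>
    rw [pvH_cons] at h
    rcases hH : pvH t' with ⟨b, _ | s⟩ <;> rw [hH] at h <;> simp [pvRowStep] at h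

theorem pvH_fst_nonneg : ∀ (t : List Int), 0 ≤ (pvH t).1 := by
  intro t
  induction t with
  | nil => simp [pvH]
  | cons y t' ih =>
    rw [pvH_cons]
    rcases h : pvH t' with ⟨b, _ | s⟩
    · simpa [pvRowStep] using (h ▸ ih : (0:Int) ≤ (b, (none : Option Int)).1)
    · have hb : 0 ≤ b := by simpa [h] using ih
      simp [pvRowStep]
      omega

-- the inner loop of A computes max a (x*10 + max of t), with the max of t read off pvH
theorem pvInner (x : Int) : ∀ (t : List Int) (a : Int),
    t.foldl (fun h m => if x * 10 + m > h then x * 10 + m else h) a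
      = (match (pvH t).2 with | none => a | some s => max a (x * 10 + s)) := by
  intro t
  induction t with
  | nil => intro a; simp [pvH]
  | cons y t' ih =>
    intro a
    rcases hH : pvH t' with ⟨b, s'⟩
    have hcons : pvH (y :: t') = pvRowStep (b, s') y := by rw [pvH_cons, hH]
    rcases s' with _ | s
    · have ht' : t' = [] := pvH_snd_none t' (by rw [hH])
      subst ht'
      simp [hcons, pvRowStep, max_def]
      clear ih hcons hH
      split_ifs <;> linarith
    · simp only [List.foldl_cons, ih, hH, hcons, pvRowStep]
      simp only [max_def]
      clear ih hcons hH
      split_ifs <;> linarith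

-- A's structural row recursion equals B's fold result (for nonnegative accumulator)
theorem pvGA_eq : ∀ (xs : List Int) (a : Int), 0 ≤ a → pvGA xs a = max a (pvH xs).1 := by
  intro xs
  induction xs with
  | nil => intro a ha; simp [pvGA, pvH, max_def]; omega
  | cons x t ih =>
    intro a ha
    rcases hH : pvH t with ⟨b, s'⟩
    have hb : 0 ≤ b := by simpa [hH] using pvH_fst_nonneg t
    have hcons : pvH (x :: t) = pvRowStep (b, s') x := by rw [pvH_cons, hH]
    rw [pvGA, pvInner x t a, hH]
    rcases s' with _ | s
    · have ht : t = [] := pvH_snd_none t (by rw [hH])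
      subst ht
      have hb0 : b = 0 := by simpa [pvH] using (congrArg Prod.fst hH).symm
      subst hb0
      simp [pvGA, hcons, pvRowStep, max_def]
      omega
    · simp only []
      rw [ih (max a (x * 10 + s)) (le_max_of_le_left ha), hcons, hH]
      simp only [pvRowStep, max_def]
      clear ih hcons hH
      split_ifs <;> linarith

-- A's enumerate/slice loop is the structural recursion pvGA
theorem pvEnum : ∀ (xs : List Int) (full : List Int) (k : Nat) (a : Int),
    xs = full.drop k →
    (PySem.List.enumerate xs (k : Int)).foldl
        (fun h (p : Int × Int) =>
          (PySem.List.slice full (some (p.1 + 1)) none).foldl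
            (fun h m => if p.2 * 10 + m > h then p.2 * 10 + m else h) h)
        a
      = pvGA xs a := by
  intro xs
  induction xs with
  | nil => intro full k a _; simp [PySem.List.enumerate_nil, pvGA]
  | cons x t ih =>
    intro full k a hdrop
    have hdrop' : t = full.drop (k + 1) := by
      have := congrArg List.tail hdrop
      simpa [List.tail_drop] using this
    rw [PySem.List.enumerate_cons]
    simp only [List.foldl_cons]
    have hslice : PySem.List.slice full (some ((k : Int) + 1)) none = full.drop (k + 1) := by
      have := PySem.List.slice_from_natCast (xs := full) (a := k + 1)
      simpa [Nat.cast_add] using this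
    rw [hslice, ← hdrop']
    have : ((k : Int) + 1) = ((k + 1 : Nat) : Int) := by push_cast; ring
    rw [this, ih full (k + 1) _ hdrop']
    rfl

theorem pvRow_eq (number : List Int) :
    (PySem.List.enumerate number).foldl
        (fun h (p : Int × Int) =>
          (PySem.List.slice number (some (p.1 + 1)) none).foldl
            (fun h m => if p.2 * 10 + m > h then p.2 * 10 + m else h) h)
        0
      = (number.reverse.foldl pvRowStep (0, none)).1 := by
  have h1 := pvEnum number number 0 0 (by simp)
  have h2 : number.reverse.foldl pvRowStep (0, none) = pvH number := by
    rw [List.foldl_reverse]; rfl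
  rw [h2]
  have h3 := pvGA_eq number 0 le_rfl
  have h4 := pvH_fst_nonneg number
  simp only [Nat.cast_zero] at h1
  rw [h1, h3]
  omega

-- ===== VERDICT (by name: the statement is the Claim_ definition above) =====
theorem part_one_spec : Claim_equal_part_one := by
  intro data _
  show part_one data = part_one_alt data
  unfold part_one part_one_alt
  have hfun :
      (fun (counter : Int) (number : List Int) =>
        let highest :=
          (PySem.List.enumerate number).foldl
            (fun highest p =>
              (PySem.List.slice number (some (p.1 + 1)) none).foldl
                (fun highest m =>
                  if p.2 * 10 + m > highest then p.2 * 10 + m else highest)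
                highest)
            0
        counter + highest)
      = (fun (total : Int) (number : List Int) =>
          total + (number.reverse.foldl pvRowStep (0, none)).1) := by
    funext c n
    simpa using congrArg (c + ·) (pvRow_eq n)
  rw [hfun]
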